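-- pv_equiv track=rewrite | github.com/samliddicott/mcpash | src/mctash/lexer.py | _strip_quotes
-- ===== SOURCE A (Python) =====
-- def _strip_quotes(text: str) -> str:
--     out: list[str] = []
--     i = 0
--     in_single = False
--     in_double = False
--     while i < len(text):
--         ch = text[i]
--         if in_single:
--             if ch == "'":
--                 in_single = False
--             else:
--                 out.append(ch)
--             i += 1
--             continue
--         if in_double:
--             if ch == '"':
--                 in_double = False
--                 i += 1
--                 continue
--             if ch == "\\" and i + 1 < len(text):
--                 nxt = text[i + 1]
--                 if nxt in ['"', "\\", "$", "`", "\n"]: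
--                     out.append(nxt)
--                 else:
--                     out.append("\\")
--                     out.append(nxt)
--                 i += 2
--                 continue
--             out.append(ch)
--             i += 1
--             continue
--         if ch == "'":
--             in_single = True
--             i += 1
--             continue
--         if ch == '"':
--             in_double = True
--             i += 1
--             continue
--         if ch == "\\" and i + 1 < len(text):
--             out.append(text[i + 1])
--             i += 2
--             continue
--         out.append(ch)
--         i += 1
--     return "".join(out)
-- ===== SOURCE B (Python) =====
-- # Two-stage rewrite: stage 1 tokenizes the text into mode-tagged segments
-- # (normal / single-quoted / double-quoted) without producing output; stage 2
-- # maps each segment through its own unescape transform and joins the results.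
--
-- def _tokenize(text):
--     segs = []
--     i = 0
--     n = len(text)
--     start = 0
--     mode = 'n'
--     while i < n:
--         ch = text[i]
--         if mode == 'n':
--             if ch == "'" or ch == '"':
--                 segs.append(('n', text[start:i]))
--                 mode = 's' if ch == "'" else 'd'
--                 i += 1
--                 start = i
--             elif ch == '\\':
--                 i += 2 if i + 1 < n else 1
--             else:
--                 i += 1
--         elif mode == 's':
--             if ch == "'":
--                 segs.append(('s', text[start:i]))
--                 mode = 'n'
--                 i += 1
--                 start = i
--             else:
--                 i += 1
--         else:  # mode == 'd'
--             if ch == '"':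
--                 segs.append(('d', text[start:i]))
--                 mode = 'n'
--                 i += 1
--                 start = i
--             elif ch == '\\':
--                 i += 2 if i + 1 < n else 1
--             else:
--                 i += 1
--     segs.append((mode, text[start:]))
--     return segs
--
--
-- def _unescape_normal(seg):
--     out = []
--     i = 0
--     n = len(seg)
--     while i < n:
--         if seg[i] == '\\' and i + 1 < n:
--             out.append(seg[i + 1])
--             i += 2
--         else:
--             out.append(seg[i])
--             i += 1
--     return "".join(out)
--
--
-- def _unescape_double(seg):
--     out = []
--     i = 0
--     n = len(seg)
--     while i < n:
--         c = seg[i]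
--         if c == '\\' and i + 1 < n:
--             nxt = seg[i + 1]
--             if nxt in '"\\$`\n':
--                 out.append(nxt)
--             else:
--                 out.append(c)
--                 out.append(nxt)
--             i += 2
--         else:
--             out.append(c)
--             i += 1
--     return "".join(out)
--
--
-- def _strip_quotes(text: str) -> str:
--     parts = []
--     for mode, seg in _tokenize(text):
--         if mode == 'n':
--             parts.append(_unescape_normal(seg))
--         elif mode == 's':
--             parts.append(seg)
--         else:
--             parts.append(_unescape_double(seg))
--     return "".join(parts)
-- ===== Notes on version B (the rewrite author's own statement) =====
-- stated objective: alternative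
-- what changed: Replaces A's single-pass per-character state machine (boolean in_single/in_double flags deciding each character) with two staged passes: a tokenizer that only finds quote boundaries and slices the text into mode-tagged segments, then per-mode unescape transforms mapped over the segments and joined.
import Mathlib
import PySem

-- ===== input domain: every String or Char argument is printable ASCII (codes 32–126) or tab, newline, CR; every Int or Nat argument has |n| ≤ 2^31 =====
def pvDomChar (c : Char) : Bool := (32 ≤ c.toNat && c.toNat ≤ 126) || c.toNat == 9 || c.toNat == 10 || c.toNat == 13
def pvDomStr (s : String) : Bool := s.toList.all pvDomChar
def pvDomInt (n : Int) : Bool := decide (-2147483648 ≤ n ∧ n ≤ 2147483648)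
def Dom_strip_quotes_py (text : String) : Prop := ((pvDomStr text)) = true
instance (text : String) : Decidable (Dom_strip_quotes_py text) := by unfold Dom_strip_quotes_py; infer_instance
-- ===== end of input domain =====

-- B replaces A's single-pass boolean-flag state machine by two staged passes:
-- a tokenizer producing mode-tagged segments, then per-mode unescape transforms
-- mapped over the segments and joined (objective: alternative decomposition).

-- ===== PORT A =====
-- A's while loop over the index with flags in_single/in_double, transliterated as
-- structural recursion consuming the character list; branch order preserved.
def stripQuotesALoop : List Char → Bool → Bool → List Char
  | [], _, _ => []
  | ch :: rest, in_single, in_double =>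
    if in_single then
      if ch = '\'' then stripQuotesALoop rest false in_double
      else ch :: stripQuotesALoop rest in_single in_double
    else if in_double then
      if ch = '"' then stripQuotesALoop rest in_single false
      else if ch = '\\' then
        match rest with
        | [] => ch :: stripQuotesALoop [] in_single in_double  -- i+1 < len fails: falls to out.append(ch)
        | nxt :: rest2 =>
          if nxt = '"' ∨ nxt = '\\' ∨ nxt = '$' ∨ nxt = '`' ∨ nxt = '\n'
          then nxt :: stripQuotesALoop rest2 in_single in_double
          else '\\' :: nxt :: stripQuotesALoop rest2 in_single in_double
      else ch :: stripQuotesALoop rest in_single in_double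
    else if ch = '\'' then stripQuotesALoop rest true in_double
    else if ch = '"' then stripQuotesALoop rest in_single true
    else if ch = '\\' then
      match rest with
      | [] => ch :: stripQuotesALoop [] in_single in_double  -- i+1 < len fails: final out.append(ch)
      | nxt :: rest2 => nxt :: stripQuotesALoop rest2 in_single in_double
    else ch :: stripQuotesALoop rest in_single in_double

def strip_quotes_py (text : String) : String :=
  String.ofList (stripQuotesALoop text.toList false false)

-- ===== PORT B =====
inductive QMode | n | s | d
deriving DecidableEq, Repr

-- Stage 1 (_tokenize): returns the current-mode segment (Python's trailing
-- text[start:], here built by consing) and the list of earlier-closed,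
-- mode-tagged segments; the caller tags the first segment with the start mode.
def tokenizeB : List Char → QMode → List Char × List (QMode × List Char)
  | [], _ => ([], [])
  | ch :: rest, QMode.n =>
    if ch = '\'' then
      ([], (QMode.s, (tokenizeB rest QMode.s).1) :: (tokenizeB rest QMode.s).2)
    else if ch = '"' then
      ([], (QMode.d, (tokenizeB rest QMode.d).1) :: (tokenizeB rest QMode.d).2)
    else if ch = '\\' then
      match rest with
      | [] => (['\\'], [])
      | nxt :: rest2 =>
        (ch :: nxt :: (tokenizeB rest2 QMode.n).1, (tokenizeB rest2 QMode.n).2)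
    else
      (ch :: (tokenizeB rest QMode.n).1, (tokenizeB rest QMode.n).2)
  | ch :: rest, QMode.s =>
    if ch = '\'' then
      ([], (QMode.n, (tokenizeB rest QMode.n).1) :: (tokenizeB rest QMode.n).2)
    else
      (ch :: (tokenizeB rest QMode.s).1, (tokenizeB rest QMode.s).2)
  | ch :: rest, QMode.d =>
    if ch = '"' then
      ([], (QMode.n, (tokenizeB rest QMode.n).1) :: (tokenizeB rest QMode.n).2)
    else if ch = '\\' then
      match rest with
      | [] => (['\\'], [])
      | nxt :: rest2 =>
        (ch :: nxt :: (tokenizeB rest2 QMode.d).1, (tokenizeB rest2 QMode.d).2)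
    else
      (ch :: (tokenizeB rest QMode.d).1, (tokenizeB rest QMode.d).2)

-- Stage 2 (_unescape_normal)
def unescN : List Char → List Char
  | [] => []
  | c :: rest =>
    if c = '\\' then
      match rest with
      | [] => [c]
      | nxt :: r2 => nxt :: unescN r2
    else c :: unescN rest

-- Stage 2 (_unescape_double)
def unescD : List Char → List Char
  | [] => []
  | c :: rest =>
    if c = '\\' then
      match rest with
      | [] => [c]
      | nxt :: r2 =>
        if nxt = '"' ∨ nxt = '\\' ∨ nxt = '$' ∨ nxt = '`' ∨ nxt = '\n'
        then nxt :: unescD r2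
        else c :: nxt :: unescD r2
    else c :: unescD rest

-- the per-mode dispatch of B's final loop
def transformB : QMode → List Char → List Char
  | QMode.n, seg => unescN seg
  | QMode.s, seg => seg
  | QMode.d, seg => unescD seg

def procSegs (l : List (QMode × List Char)) : List Char :=
  l.flatMap (fun p => transformB p.1 p.2)

def strip_quotes_py_alt (text : String) : String :=
  String.ofList (procSegs ((QMode.n, (tokenizeB text.toList QMode.n).1) :: (tokenizeB text.toList QMode.n).2))

-- ===== PRECONDITION & SPEC =====
def Spec_strip_quotes_py (text : String) (out : String) : Prop := out = strip_quotes_py_alt text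
instance (text : String) (out : String) : Decidable (Spec_strip_quotes_py text out) := by unfold Spec_strip_quotes_py; infer_instance

-- ===== CLAIM (what is proved, stated in full; the proofs are below) =====
def Claim_equal_strip_quotes_py : Prop := ∀ (text : String), Dom_strip_quotes_py text → Spec_strip_quotes_py text (strip_quotes_py text)

-- ===== LEMMAS AND PROOFS =====
theorem unescN_cons_ne (c : Char) (rest : List Char) (h : ¬ c = '\\') :
    unescN (c :: rest) = c :: unescN rest := by
  rw [unescN.eq_def]; simp [h]

theorem unescD_cons_ne (c : Char) (rest : List Char) (h : ¬ c = '\\') :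
    unescD (c :: rest) = c :: unescD rest := by
  rw [unescD.eq_def]; simp [h]

def mFlags : QMode → Bool × Bool
  | QMode.n => (false, false)
  | QMode.s => (true, false)
  | QMode.d => (false, true)

theorem aLoop_eq_segs (cs : List Char) (m : QMode) :
    stripQuotesALoop cs (mFlags m).1 (mFlags m).2 =
      transformB m (tokenizeB cs m).1 ++ procSegs (tokenizeB cs m).2 := by
  fun_induction tokenizeB cs m
  all_goals
    first
    | (rename_i mv; cases mv <;>
        simp [stripQuotesALoop, transformB, procSegs, unescN, unescD])
    | (simp [stripQuotesALoop]; done)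
    | (rw [stripQuotesALoop.eq_def];
       simp_all [stripQuotesALoop, transformB, procSegs, unescN, unescD, mFlags,
                 unescN_cons_ne, unescD_cons_ne];
       try (split <;> simp))

-- ===== VERDICT (by name: the statement is the Claim_ definition above) =====
theorem strip_quotes_py_spec : Claim_equal_strip_quotes_py := by
  intro text _
  unfold Spec_strip_quotes_py strip_quotes_py strip_quotes_py_alt
  have h := aLoop_eq_segs text.toList QMode.n
  simp only [mFlags, procSegs, List.flatMap_cons, transformB] at h ⊢
  rw [h]
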